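-- pv_equiv track=rewrite | github.com/joshanashakya/dissertation | workspace/dataset/java-python/GeeksForGeeks/708/A/2.py | max_bitwise_or
-- ===== SOURCE A (Python) =====
-- def max_bitwise_or(L, R):
--     v1 = []
--     v2 = []
--     v3 = []
--     z = 0
--     i = 0
--     ans = 0
--     cnt = 1
--
--     # Converting L to its binary representation
--     while (L > 0):
--         v1.append(L % 2)
--         L = L // 2
--
--     # Converting R to its binary representation
--     while (R > 0):
--         v2.append(R % 2)
--         R = R // 2
--
--     # In order to make the number
--     # of bits of L and R same
--     while (len(v1) != len(v2)):
--
--         # Push 0 to the MSB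
--         v1.append(0)
--
--     for i in range(len(v2) - 1, -1, -1):
--
--         # When ith bit of R is 1
--         # and ith bit of L is 0
--         if (v2[i] == 1 and
--             v1[i] == 0 and z == 0):
--             z = 1
--             continue
--
--         # From MSB side set all bits of L to be 1
--         if (z == 1):
--
--             # From (i+1)th bit, all bits
--             # of L changed to be 1
--             v1[i] = 1
--
--     for i in range(len(v2)):
--         v3.append(v2[i] | v1[i])
--
--     for i in range(len(v2)):
--         if (v3[i] == 1):
--             ans += cnt
--         cnt *= 2
--
--     return ans
-- ===== SOURCE B (Python) =====
-- def max_bitwise_or(L, R):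
--     # Closed form: set every bit below the highest position where R has 1 and L has 0.
--     if R <= 0:
--         return 0
--     if L < 0:
--         L = 0
--     d = R ^ (R & L)  # bits set in R but not in L
--     if d == 0:
--         return L | R
--     return (L | R) | ((1 << (d.bit_length() - 1)) - 1)
-- ===== Notes on version B (the rewrite author's own statement) =====
-- stated objective: simpler
-- what changed: A builds LSB-first bit lists of L and R, pads, scans from the MSB filling lower bits, ORs the lists pointwise and re-sums with powers of two; B computes the same value in closed form with integer bit operations: for R > 0 (L clamped to 0 when negative) take d = R ^ (R & L) and return L | R if d == 0, else (L | R) | ((1 << (d.bit_length() - 1)) - 1).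
import Mathlib
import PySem

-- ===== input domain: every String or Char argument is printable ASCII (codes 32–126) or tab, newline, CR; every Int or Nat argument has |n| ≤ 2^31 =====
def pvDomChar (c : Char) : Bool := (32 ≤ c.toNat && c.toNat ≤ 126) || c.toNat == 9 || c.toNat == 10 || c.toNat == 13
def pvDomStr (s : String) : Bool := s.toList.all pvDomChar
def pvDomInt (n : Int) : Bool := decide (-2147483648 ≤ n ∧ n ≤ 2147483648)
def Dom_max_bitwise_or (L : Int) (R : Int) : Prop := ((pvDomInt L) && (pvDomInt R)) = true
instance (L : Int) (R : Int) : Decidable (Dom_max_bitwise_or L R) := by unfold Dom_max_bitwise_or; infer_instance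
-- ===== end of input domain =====

-- B replaces A's bit-list building, MSB scan and weighted re-summation by a closed form on
-- integers (L | R with all bits filled below the top position where R has 1 and L has 0); objective: simpler.

-- ===== PORT A =====
-- while (n > 0): v.append(n % 2); n = n // 2   — the LSB-first bit list A builds (empty for n ≤ 0)
def pvToBits (n : Int) : List Int :=
  if 0 < n then PySem.Int.mod n 2 :: pvToBits (PySem.Int.floordiv n 2) else []
termination_by n.toNat
decreasing_by
  rw [PySem.Int.floordiv_eq_ediv_of_pos (by norm_num)]
  omega

-- while (len(v1) != len(v2)): v1.append(0)  — fueled; fuel = len(v2) suffices exactly when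
-- len(v1) ≤ len(v2), which Pre_ guarantees (otherwise the Python loop never terminates)
def pvPad : Nat → List Int → Nat → List Int
  | 0, v1, _ => v1
  | fuel + 1, v1, k => if v1.length ≠ k then pvPad fuel (v1 ++ [0]) k else v1

-- the body of A's 'for i in range(len(v2)-1, -1, -1)' loop, state = (v1, z)
def pvScanStep (v2 : List Int) (st : List Int × Int) (i : Int) : List Int × Int :=
  if PySem.List.pyGetD v2 i 0 = 1 ∧ PySem.List.pyGetD st.1 i 0 = 0 ∧ st.2 = 0 then (st.1, 1)
  else if st.2 = 1 then (PySem.List.pySetD st.1 i 1, st.2) else st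

-- the loop itself, run over range(j-1, -1, -1)
def pvScanGo (v2 : List Int) (j : Nat) (st : List Int × Int) : List Int × Int :=
  (PySem.List.pyRange ((j : Int) - 1) (-1) (-1)).foldl (pvScanStep v2) st

def max_bitwise_or (L : Int) (R : Int) : Int :=
  let v1 := pvToBits L
  let v2 := pvToBits R
  let v1 := pvPad v2.length v1 v2.length
  let st := pvScanGo v2 v2.length (v1, 0)
  let v1 := st.1
  -- v2[i] | v1[i]: both entries are 0/1, Int lor is exact
  let v3 := (PySem.List.pyRange 0 (v2.length : Int) 1).map
      (fun i => Int.lor (PySem.List.pyGetD v2 i 0) (PySem.List.pyGetD v1 i 0))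
  let fin := (PySem.List.pyRange 0 (v2.length : Int) 1).foldl
      (fun (ac : Int × Int) i =>
        (if PySem.List.pyGetD v3 i 0 = 1 then ac.1 + ac.2 else ac.1, ac.2 * 2))
      (0, 1)
  fin.1

-- ===== PORT B =====
-- all operands are nonnegative here, so Python's ^ & | << and bit_length()-1 coincide with
-- Nat's ^^^ &&& ||| 2^· and Nat.log2 (exact on this branch: R > 0, L clamped to ≥ 0)
def max_bitwise_or_alt (L : Int) (R : Int) : Int :=
  if R ≤ 0 then 0
  else
    let l : Nat := (if L < 0 then 0 else L).toNat
    let r : Nat := R.toNat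
    let d : Nat := r ^^^ (r &&& l)
    if d = 0 then ((l ||| r : Nat) : Int)
    else (((l ||| r) ||| (2 ^ Nat.log2 d - 1) : Nat) : Int)

-- ===== PRECONDITION & SPEC =====
-- Pre_ excludes exactly the inputs on which A never returns: when the positive part of L has
-- more binary digits than that of R, A's padding loop 'while len(v1) != len(v2)' runs forever.
def Pre_max_bitwise_or (L : Int) (R : Int) : Prop :=
  (L ≤ 0 ∧ R ≤ 0) ∨ (0 < R ∧ L < 2 ^ (Nat.log2 R.toNat + 1))
instance (L : Int) (R : Int) : Decidable (Pre_max_bitwise_or L R) := by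
  unfold Pre_max_bitwise_or; infer_instance

def pvWitness_max_bitwise_or : Int × Int := (5, 10)

def Spec_max_bitwise_or (L : Int) (R : Int) (out : Int) : Prop := out = max_bitwise_or_alt L R
instance (L : Int) (R : Int) (out : Int) : Decidable (Spec_max_bitwise_or L R out) := by
  unfold Spec_max_bitwise_or; infer_instance

-- ===== CLAIM (what is proved, stated in full; the proofs are below) =====
def Claim_equal_max_bitwise_or : Prop := ∀ (L : Int) (R : Int), Dom_max_bitwise_or L R → Pre_max_bitwise_or L R → Spec_max_bitwise_or L R (max_bitwise_or L R)

-- ===== LEMMAS AND PROOFS =====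

theorem pvToBits_getD (n : Int) (j : Nat) :
    (pvToBits n).getD j 0 = if n.toNat.testBit j then 1 else 0 := by
  induction n using pvToBits.induct generalizing j with
  | case1 n h ih =>
    rw [pvToBits, if_pos h]
    cases j with
    | zero =>
      simp only [List.getD_cons_zero, Nat.testBit_zero,
        PySem.Int.mod_eq_emod_of_pos (by norm_num : (0:Int) < 2)]
      split_ifs with hb
      · simp at hb; omega
      · simp at hb; omega
    | succ j =>
      simp only [List.getD_cons_succ, ih]
      have hdiv : (PySem.Int.floordiv n 2).toNat = n.toNat / 2 := by
        rw [PySem.Int.floordiv_eq_ediv_of_pos (by norm_num)]; omega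
      rw [hdiv, ← Nat.testBit_succ]
  | case2 n h =>
    rw [pvToBits, if_neg h]
    have : n.toNat = 0 := by omega
    simp [this]

theorem pvToBits_lt (n : Int) : n.toNat < 2 ^ (pvToBits n).length := by
  induction n using pvToBits.induct with
  | case1 n h ih =>
    rw [pvToBits, if_pos h]
    have hdiv : (PySem.Int.floordiv n 2).toNat = n.toNat / 2 := by
      rw [PySem.Int.floordiv_eq_ediv_of_pos (by norm_num)]; omega
    rw [hdiv] at ih
    simp only [List.length_cons, pow_succ]
    omega
  | case2 n h =>
    rw [pvToBits, if_neg h]; simp; omega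

theorem pvToBits_len_le (n : Int) (m : Nat) (h : n.toNat < 2 ^ m) :
    (pvToBits n).length ≤ m := by
  induction n using pvToBits.induct generalizing m with
  | case1 n hp ih =>
    rw [pvToBits, if_pos hp]
    have hdiv : (PySem.Int.floordiv n 2).toNat = n.toNat / 2 := by
      rw [PySem.Int.floordiv_eq_ediv_of_pos (by norm_num)]; omega
    cases m with
    | zero => simp at h; omega
    | succ m =>
      have : (PySem.Int.floordiv n 2).toNat < 2 ^ m := by
        rw [hdiv]; rw [pow_succ] at h; omega
      simpa using ih m this
  | case2 n hp => rw [pvToBits, if_neg hp]; simp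

theorem getD_append_zero (v : List Int) (j : Nat) :
    (v ++ [(0:Int)]).getD j 0 = v.getD j 0 := by
  simp only [List.getD, List.getElem?_append]
  split_ifs with h
  · rfl
  · rcases Nat.lt_or_ge (j - v.length) 1 with h1 | h1
    · have : j - v.length = 0 := by omega
      simp [this, List.getElem?_eq_none (by omega : v.length ≤ j)]
    · simp [List.getElem?_eq_none (by simp; omega : ([(0:Int)]).length ≤ j - v.length),
        List.getElem?_eq_none (by omega : v.length ≤ j)]

theorem pvPad_spec (fuel : Nat) (v : List Int) (k : Nat) (h1 : v.length ≤ k)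
    (h2 : k ≤ v.length + fuel) :
    (pvPad fuel v k).length = k ∧ ∀ j : Nat, (pvPad fuel v k).getD j 0 = v.getD j 0 := by
  induction fuel generalizing v with
  | zero =>
    have : v.length = k := by omega
    simp [pvPad, this]
  | succ fuel ih =>
    rw [pvPad]
    split_ifs with h
    · have := ih (v ++ [0]) (by simp; omega) (by simp; omega)
      refine ⟨this.1, fun j => ?_⟩
      rw [this.2 j, getD_append_zero]
    · simp_all

theorem pvScanGo_zero (v2 : List Int) (st : List Int × Int) : pvScanGo v2 0 st = st := by
  rw [pvScanGo, PySem.List.pyRange_neg_one_eq_nil (by norm_num)]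
  rfl

theorem pvScanGo_succ (v2 : List Int) (j : Nat) (st : List Int × Int) :
    pvScanGo v2 (j + 1) st = pvScanGo v2 j (pvScanStep v2 st (j : Int)) := by
  rw [pvScanGo, pvScanGo]
  have h1 : ((j : Int) + 1) - 1 = (j : Int) := by ring
  push_cast
  rw [h1, PySem.List.pyRange_neg_one_cons (by omega : (-1:Int) < (j:Int))]
  rfl

theorem getD_set_eq (w : List Int) (n : Nat) (hn : n < w.length) (i : Nat) :
    (w.set n 1).getD i 0 = if i = n then 1 else w.getD i 0 := by
  simp only [List.getD, List.getElem?_set]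
  by_cases h : n = i
  · subst h; simp [hn]
  · simp [h, Ne.symm h]

theorem pvScan_z1 (v2 : List Int) (j : Nat) (w : List Int) (hj : j ≤ w.length) :
    (pvScanGo v2 j (w, 1)).2 = 1 ∧ (pvScanGo v2 j (w, 1)).1.length = w.length ∧
      ∀ i : Nat, (pvScanGo v2 j (w, 1)).1.getD i 0 = if i < j then 1 else w.getD i 0 := by
  induction j generalizing w with
  | zero => simp [pvScanGo_zero]
  | succ j ih =>
    rw [pvScanGo_succ]
    have hstep : pvScanStep v2 (w, 1) (j : Int) = (w.set j 1, 1) := by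
      rw [pvScanStep]
      simp [PySem.List.pySetD_natCast]
    rw [hstep]
    have hlen : (w.set j 1).length = w.length := by simp
    obtain ⟨z1, l1, g1⟩ := ih (w.set j 1) (by omega)
    refine ⟨z1, by rw [l1, hlen], fun i => ?_⟩
    rw [g1 i, getD_set_eq w j (by omega) i]
    split_ifs <;> omega

theorem testBit_iff_div_mod (D j : Nat) : D.testBit j = true ↔ D / 2 ^ j % 2 = 1 := by
  have h := Nat.testBit_div_two_pow (n := j) D 0
  rw [Nat.zero_add] at h
  rw [← h, Nat.testBit_zero]
  simp

theorem pvScan_z0 (v2 : List Int) (D : Nat) (j : Nat) (w : List Int) (hj : j ≤ w.length)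
    (hc : ∀ i : Nat, i < j →
      ((PySem.List.pyGetD v2 (i : Int) 0 = 1 ∧ PySem.List.pyGetD w (i : Int) 0 = 0) ↔ D.testBit i)) :
    (D % 2 ^ j = 0 → pvScanGo v2 j (w, 0) = (w, 0)) ∧
    (D % 2 ^ j ≠ 0 → (pvScanGo v2 j (w, 0)).2 = 1 ∧
      (pvScanGo v2 j (w, 0)).1.length = w.length ∧
      ∀ i : Nat, (pvScanGo v2 j (w, 0)).1.getD i 0 =
        if i < Nat.log2 (D % 2 ^ j) then 1 else w.getD i 0) := by
  induction j with
  | zero =>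
    refine ⟨fun _ => pvScanGo_zero v2 _, fun h => absurd (by omega : D % 2 ^ 0 = 0) h⟩
  | succ j ih =>
    rw [pvScanGo_succ]
    have hmod : D % 2 ^ (j + 1) = D % 2 ^ j + 2 ^ j * (D / 2 ^ j % 2) := Nat.mod_pow_succ
    by_cases hb : D.testBit j = true
    · have hcond : PySem.List.pyGetD v2 (j : Int) 0 = 1 ∧ PySem.List.pyGetD w (j : Int) 0 = 0 :=
        (hc j (by omega)).mpr hb
      have hstep : pvScanStep v2 (w, 0) (j : Int) = (w, 1) := by
        rw [pvScanStep, if_pos ⟨hcond.1, hcond.2, rfl⟩]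
      rw [hstep]
      have hd2 : D / 2 ^ j % 2 = 1 := (testBit_iff_div_mod D j).mp hb
      rw [hd2, Nat.mul_one] at hmod
      have hlow : D % 2 ^ j < 2 ^ j := Nat.mod_lt _ (by positivity)
      have hge : 2 ^ j ≤ D % 2 ^ (j + 1) := by omega
      have hlt : D % 2 ^ (j + 1) < 2 ^ (j + 1) := Nat.mod_lt _ (by positivity)
      have hlog : Nat.log2 (D % 2 ^ (j + 1)) = j := by
        rw [Nat.log2_eq_log_two]
        exact Nat.log_eq_of_pow_le_of_lt_pow hge hlt
      obtain ⟨z1, l1, g1⟩ := pvScan_z1 v2 j w (by omega)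
      refine ⟨fun h0 => absurd h0 (by omega), fun _ => ⟨z1, l1, fun i => ?_⟩⟩
      rw [g1 i, hlog]
    · have hd2 : D / 2 ^ j % 2 = 0 := by
        rcases Nat.mod_two_eq_zero_or_one (D / 2 ^ j) with h | h
        · exact h
        · exact absurd ((testBit_iff_div_mod D j).mpr h) hb
      rw [hd2, Nat.mul_zero] at hmod
      have hmod' : D % 2 ^ (j + 1) = D % 2 ^ j := by omega
      have hcond : ¬ (PySem.List.pyGetD v2 (j : Int) 0 = 1 ∧ PySem.List.pyGetD w (j : Int) 0 = 0) := by
        intro h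
        exact hb ((hc j (by omega)).mp h)
      have hstep : pvScanStep v2 (w, 0) (j : Int) = (w, 0) := by
        rw [pvScanStep]
        rw [if_neg (by tauto)]
        norm_num
      rw [hstep, hmod']
      exact ih (by omega) (fun i hi => hc i (by omega))

theorem pvSumFold (k : Nat) (v3 : List Int) (a c : Int) :
    (PySem.List.pyRange 0 (k : Int) 1).foldl
      (fun (ac : Int × Int) i =>
        (if PySem.List.pyGetD v3 i 0 = 1 then ac.1 + ac.2 else ac.1, ac.2 * 2)) (a, c)
    = (a + c * (∑ i ∈ Finset.range k, if PySem.List.pyGetD v3 (i : Int) 0 = 1 then (2:Int)^i else 0),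
       c * 2 ^ k) := by
  induction k with
  | zero =>
    rw [PySem.List.pyRange_one_eq_nil (by norm_num)]
    simp
  | succ k ih =>
    rw [Nat.cast_succ, PySem.List.pyRange_one_succ_right (by positivity), List.foldl_append, ih]
    simp only [List.foldl_cons, List.foldl_nil, Finset.sum_range_succ]
    split_ifs with h <;> simp only [Prod.mk.injEq] <;> constructor <;> ring

theorem pvSumFold_fst (k : Nat) (v3 : List Int) (a c : Int) :
    ((PySem.List.pyRange 0 (k : Int) 1).foldl
      (fun (ac : Int × Int) i =>
        (if PySem.List.pyGetD v3 i 0 = 1 then ac.1 + ac.2 else ac.1, ac.2 * 2)) (a, c)).1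
    = a + c * (∑ i ∈ Finset.range k, if PySem.List.pyGetD v3 (i : Int) 0 = 1 then (2:Int)^i else 0) := by
  rw [pvSumFold]

theorem pvBitSum (k N : Nat) :
    (∑ i ∈ Finset.range k, if N.testBit i then (2:Int)^i else 0) = ((N % 2 ^ k : Nat) : Int) := by
  induction k with
  | zero => simp [Nat.mod_one]
  | succ k ih =>
    rw [Finset.sum_range_succ, ih]
    have hmod : N % 2 ^ (k + 1) = N % 2 ^ k + 2 ^ k * (N / 2 ^ k % 2) := Nat.mod_pow_succ
    by_cases hb : N.testBit k = true
    · have h1 : N / 2 ^ k % 2 = 1 := (testBit_iff_div_mod N k).mp hb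
      rw [if_pos hb]
      rw [h1, Nat.mul_one] at hmod
      rw [hmod]
      push_cast
      ring
    · have h1 : N / 2 ^ k % 2 = 0 := by
        rcases Nat.mod_two_eq_zero_or_one (N / 2 ^ k) with h | h
        · exact h
        · exact absurd ((testBit_iff_div_mod N k).mpr h) hb
      rw [if_neg hb]
      rw [h1, Nat.mul_zero, Nat.add_zero] at hmod
      rw [hmod]
      omega

-- ===== VERDICT (by name: the statement is the Claim_ definition above) =====
theorem max_bitwise_or_spec : Claim_equal_max_bitwise_or := by
  unfold Claim_equal_max_bitwise_or
  intro L R _ hpre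
  unfold Spec_max_bitwise_or
  by_cases hR : R ≤ 0
  · have hL : L ≤ 0 := by
      rcases hpre with ⟨h, _⟩ | ⟨h, _⟩
      · exact h
      · omega
    have hbR : pvToBits R = [] := by rw [pvToBits, if_neg (by omega)]
    have hbL : pvToBits L = [] := by rw [pvToBits, if_neg (by omega)]
    rw [max_bitwise_or, max_bitwise_or_alt, if_pos hR, hbR, hbL]
    simp only [List.length_nil, Nat.cast_zero, pvPad, pvScanGo_zero]
    rw [PySem.List.pyRange_one_eq_nil (le_refl 0)]
    simp
  · have h0R : 0 < R := by omega
    set r := R.toNat with hr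
    set l := L.toNat with hl
    set k := (pvToBits R).length with hk
    have hrk : r < 2 ^ k := pvToBits_lt R
    have hrpos : r ≠ 0 := by omega
    have hkle : k ≤ Nat.log2 r + 1 := pvToBits_len_le R _ Nat.lt_log2_self
    have hkge : Nat.log2 r < k :=
      (Nat.pow_lt_pow_iff_right (by norm_num)).mp (lt_of_le_of_lt (Nat.log2_self_le hrpos) hrk)
    have hkeq : k = Nat.log2 r + 1 := by omega
    have hlk : l < 2 ^ k := by
      rcases hpre with ⟨_, h⟩ | ⟨_, h⟩
      · have : l = 0 := by omega
        rw [this]; positivity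
      · have h2 : L < (2:Int) ^ k := by rw [hkeq]; exact h
        have hc : (((2:Nat) ^ k : Nat) : Int) = (2:Int) ^ k := by push_cast; rfl
        omega
    have hlen1 : (pvToBits L).length ≤ k := pvToBits_len_le L k hlk
    obtain ⟨hwlen, hwget⟩ := pvPad_spec k (pvToBits L) k hlen1 (by omega)
    set w := pvPad k (pvToBits L) k with hw
    have hgw : ∀ i : Nat, w.getD i 0 = if l.testBit i then 1 else 0 := fun i => by
      rw [hwget i, pvToBits_getD]
    have hgv2 : ∀ i : Nat, (pvToBits R).getD i 0 = if r.testBit i then 1 else 0 := fun i =>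
      pvToBits_getD R i
    set D := r ^^^ (r &&& l) with hD
    have hDbit : ∀ i, D.testBit i = (r.testBit i && ! l.testBit i) := by
      intro i
      rw [hD, Nat.testBit_xor, Nat.testBit_land]
      cases r.testBit i <;> cases l.testBit i <;> rfl
    have hcond : ∀ i : Nat, i < k →
        ((PySem.List.pyGetD (pvToBits R) (i : Int) 0 = 1 ∧ PySem.List.pyGetD w (i : Int) 0 = 0) ↔
          D.testBit i) := by
      intro i _
      rw [PySem.List.pyGetD_natCast, PySem.List.pyGetD_natCast, hgw i, hgv2 i, hDbit i]
      cases hrb : r.testBit i <;> cases hlb : l.testBit i <;> simp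
    have hDlt : D < 2 ^ k := Nat.xor_lt_two_pow hrk (lt_of_le_of_lt Nat.and_le_left hrk)
    have hDmod : D % 2 ^ k = D := Nat.mod_eq_of_lt hDlt
    have hscan := pvScan_z0 (pvToBits R) D k w (by omega) hcond
    rw [hDmod] at hscan
    -- the closed-form value N of both sides
    set p := Nat.log2 D with hp
    set N : Nat := if D = 0 then l ||| r else (l ||| r) ||| (2 ^ p - 1) with hN
    have hNk : N < 2 ^ k := by
      rw [hN]
      split_ifs with hd
      · exact Nat.or_lt_two_pow hlk hrk
      · refine Nat.or_lt_two_pow (Nat.or_lt_two_pow hlk hrk) ?_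
        have hpk : p < k := by
          have := Nat.log2_self_le hd
          have := (Nat.pow_lt_pow_iff_right (by norm_num : 1 < 2)).mp (lt_of_le_of_lt this hDlt)
          omega
        have : 2 ^ p ≤ 2 ^ k := Nat.pow_le_pow_right (by norm_num) (le_of_lt hpk)
        omega
    -- the scanned v1 list, read at i < k
    have hscan1 : ∀ i : Nat, i < k →
        (pvScanGo (pvToBits R) k (w, 0)).1.getD i 0 =
          if D = 0 then w.getD i 0 else if i < p then 1 else w.getD i 0 := by
      intro i _
      by_cases hd : D = 0
      · simp only [if_pos hd, hscan.1 (by simp [hd])]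
      · simp only [if_neg hd, (hscan.2 hd).2.2 i]
    -- each v3 entry equals the corresponding bit of N
    have hv3 : ∀ i : Nat, i < k →
        PySem.List.pyGetD
          ((PySem.List.pyRange 0 (k : Int) 1).map
            (fun i => Int.lor (PySem.List.pyGetD (pvToBits R) i 0)
              (PySem.List.pyGetD (pvScanGo (pvToBits R) k (w, 0)).1 i 0))) (i : Int) 0
          = if N.testBit i then 1 else 0 := by
      intro i hi
      rw [PySem.List.pyGetD_map_pyRange _ k i 0 hi]
      rw [PySem.List.pyGetD_natCast, PySem.List.pyGetD_natCast, hgv2 i, hscan1 i hi, hgw i]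
      rw [hN]
      by_cases hd : D = 0
      · rw [if_pos hd, if_pos hd]
        rw [Nat.testBit_lor]
        cases hrb : r.testBit i <;> cases hlb : l.testBit i <;> decide
      · rw [if_neg hd, if_neg hd]
        rw [Nat.testBit_lor, Nat.testBit_lor, Nat.testBit_two_pow_sub_one]
        by_cases hip : i < p
        · rw [if_pos hip]
          cases hrb : r.testBit i <;> simp [hip] <;> decide
        · rw [if_neg hip]
          cases hrb : r.testBit i <;> cases hlb : l.testBit i <;> simp [hip] <;> decide
    -- evaluate port A, then port B
    have hsumeq : ∀ v3 : List Int,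
        (∀ i : Nat, i < k → PySem.List.pyGetD v3 (i : Int) 0 = if N.testBit i then 1 else 0) →
        (∑ i ∈ Finset.range k, if PySem.List.pyGetD v3 (i : Int) 0 = 1 then (2:Int)^i else 0)
          = ((N % 2 ^ k : Nat) : Int) := by
      intro v3 hv
      rw [← pvBitSum k N]
      refine Finset.sum_congr rfl fun i hi => ?_
      rw [Finset.mem_range] at hi
      rw [hv i hi]
      by_cases hb : N.testBit i <;> simp [hb]
    simp only [max_bitwise_or]
    rw [← hk, pvSumFold_fst, hsumeq _ hv3, Nat.mod_eq_of_lt hNk]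
    simp only [max_bitwise_or_alt, if_neg hR]
    have hlp : (if L < 0 then 0 else L).toNat = l := by split_ifs <;> omega
    rw [hlp, ← hr, ← hD, ← hp, hN]
    by_cases hd : D = 0
    · rw [if_pos hd, if_pos hd]
      ring
    · rw [if_neg hd, if_neg hd]
      ring
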